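-- pv_equiv track=rewrite | github.com/a9202507/circuit_checker_v3 | backend/main.py | _detect_ic_refs
-- ===== SOURCE A (Python) =====
-- NON_IC_PREFIXES = ("C", "R", "J", "TP", "L", "D", "F", "Y", "T", "FB", "SW")
--
-- def _detect_ic_refs(partmap: dict) -> list[str]:
--     ic_refs = []
--     for ref in sorted(partmap.keys()):
--         is_non_ic = any(ref.upper().startswith(p) and (len(ref) == len(p) or ref[len(p)].isdigit())
--                         for p in NON_IC_PREFIXES)
--         if not is_non_ic:
--             ic_refs.append(ref)
--     return ic_refs
-- ===== SOURCE B (Python) =====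
-- NON_IC_PREFIXES = ("C", "R", "J", "TP", "L", "D", "F", "Y", "T", "FB", "SW")
-- _NON_IC_SET = frozenset(NON_IC_PREFIXES)
--
-- def _detect_ic_refs(partmap: dict) -> list[str]:
--     ic_refs = []
--     for ref in sorted(partmap.keys()):
--         u = ref.upper()
--         i = 0
--         while i < len(u) and u[i].isalpha():
--             i += 1
--         letters, rest = u[:i], u[i:]
--         if not (letters in _NON_IC_SET and (rest == "" or rest[0].isdigit())):
--             ic_refs.append(ref)
--     return ic_refs
-- ===== Notes on version B (the rewrite author's own statement) =====
-- stated objective: alternative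
-- what changed: B replaces A's per-key scan over all 11 prefixes with any(...) by parsing the key's maximal leading alphabetic run once and doing a single frozenset lookup plus a digit-or-end boundary check.
import Mathlib
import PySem

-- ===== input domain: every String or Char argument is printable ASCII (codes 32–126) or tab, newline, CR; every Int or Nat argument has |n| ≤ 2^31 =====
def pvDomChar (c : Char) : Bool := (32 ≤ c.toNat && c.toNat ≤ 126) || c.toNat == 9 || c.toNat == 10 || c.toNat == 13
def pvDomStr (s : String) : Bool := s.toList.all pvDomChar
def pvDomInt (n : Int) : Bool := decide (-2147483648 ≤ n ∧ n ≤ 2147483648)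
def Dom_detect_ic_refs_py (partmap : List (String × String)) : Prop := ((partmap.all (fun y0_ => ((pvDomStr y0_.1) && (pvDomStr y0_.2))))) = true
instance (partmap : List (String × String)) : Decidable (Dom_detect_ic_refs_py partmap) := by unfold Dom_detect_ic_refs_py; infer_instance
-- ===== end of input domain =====

-- B replaces A's per-prefix any(...) scan by parsing the maximal leading letter run once and one set lookup (objective: alternative decomposition).

-- ===== PORT A =====
def pvPrefixes : List String := ["C", "R", "J", "TP", "L", "D", "F", "Y", "T", "FB", "SW"]

-- literal port of A: for each sorted key, any(p: ref.upper().startswith(p) and (len(ref)==len(p) or ref[len(p)].isdigit()))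
def detect_ic_refs_py (partmap : List (String × String)) : List String :=
  (PySem.List.sorted (PySem.List.dedup (partmap.map Prod.fst)) (fun x => x) false).foldl
    (fun ic_refs ref =>
      let is_non_ic := pvPrefixes.any (fun p =>
        PySem.Str.startswith (PySem.Str.upper ref) p &&
          (PySem.Str.len ref == PySem.Str.len p ||
            (match PySem.Str.pyGet? ref (PySem.Str.len p) with
             | some c => PySem.Chars.isdigit c
             | none => false)))  -- the none branch is unreachable: Python only reads ref[len(p)] after startswith succeeded and len(ref) ≠ len(p)
      if !is_non_ic then ic_refs ++ [ref] else ic_refs) []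

-- ===== PORT B =====
def pvNonIcSet : PySem.Set (List Char) := PySem.Set.ofList (pvPrefixes.map String.toList)

-- B's while loop: index i scanning the leading alphabetic run
def pvScanAlpha : List Char → Nat
  | [] => 0
  | c :: t => if PySem.Chars.isalpha c then pvScanAlpha t + 1 else 0

-- literal port of B (Source B); string slices u[:i] / u[i:] are on code points, hence take/drop on the char list
def detect_ic_refs_py_alt (partmap : List (String × String)) : List String :=
  (PySem.List.sorted (PySem.List.dedup (partmap.map Prod.fst)) (fun x => x) false).foldl
    (fun ic_refs ref =>
      let u := PySem.Chars.upper ref.toList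
      let i := pvScanAlpha u
      let letters := u.take i
      let rest := u.drop i
      if !(PySem.Set.contains pvNonIcSet letters &&
            (match rest with | [] => true | c :: _ => PySem.Chars.isdigit c)) then
        ic_refs ++ [ref]
      else ic_refs) []

-- ===== PRECONDITION & SPEC =====
def Spec_detect_ic_refs_py (partmap : List (String × String)) (out : List String) : Prop := out = detect_ic_refs_py_alt partmap
instance (partmap : List (String × String)) (out : List String) : Decidable (Spec_detect_ic_refs_py partmap out) := by unfold Spec_detect_ic_refs_py; infer_instance

-- ===== CLAIM (what is proved, stated in full; the proofs are below) =====
def Claim_equal_detect_ic_refs_py : Prop := ∀ (partmap : List (String × String)), Dom_detect_ic_refs_py partmap → Spec_detect_ic_refs_py partmap (detect_ic_refs_py partmap)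

-- ===== LEMMAS AND PROOFS =====

lemma isdigit_upperChar (c : Char) :
    PySem.Chars.isdigit (PySem.Chars.upperChar c) = PySem.Chars.isdigit c := by
  unfold PySem.Chars.upperChar PySem.Chars.isdigit PySem.Chars.islower
  by_cases h : ('a' ≤ c ∧ c ≤ 'z')
  · have h1 : 97 ≤ c.toNat := h.1
    have h2 : c.toNat ≤ 122 := h.2
    have ht : (Char.ofNat (c.toNat - 32)).toNat = c.toNat - 32 := by
      rw [Char.toNat_ofNat, if_pos]
      exact Or.inl (by omega)
    simp only [h.1, h.2, decide_true, Bool.and_true, if_true]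
    have d1 : ¬ (Char.ofNat (c.toNat - 32) ≤ '9') := by
      intro hh
      have : (Char.ofNat (c.toNat - 32)).toNat ≤ 57 := hh
      omega
    have d2 : ¬ (c ≤ '9') := by
      intro hh; have : c.toNat ≤ 57 := hh; omega
    simp [d1, d2]
  · have hne : ¬ (decide ('a' ≤ c) && decide (c ≤ 'z')) = true := by
      simp only [Bool.and_eq_true, decide_eq_true_eq]; exact h
    simp [hne]

lemma digit_not_alpha (c : Char) (h : PySem.Chars.isdigit c = true) :
    PySem.Chars.isalpha c = false := by
  unfold PySem.Chars.isdigit at h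
  unfold PySem.Chars.isalpha PySem.Chars.isupper PySem.Chars.islower
  simp only [Bool.and_eq_true, decide_eq_true_eq] at h
  have h1 : 48 ≤ c.toNat := h.1
  have h2 : c.toNat ≤ 57 := h.2
  have a1 : ¬ ('A' ≤ c) := by intro hh; have : 65 ≤ c.toNat := hh; omega
  have a2 : ¬ ('a' ≤ c) := by intro hh; have : 97 ≤ c.toNat := hh; omega
  simp [a1, a2]

lemma pvScanAlpha_take (L : List Char) :
    L.take (pvScanAlpha L) = L.takeWhile PySem.Chars.isalpha := by
  induction L with
  | nil => rfl
  | cons c t ih =>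
    by_cases h : PySem.Chars.isalpha c
    · simp [pvScanAlpha, h, ih]
    · simp [pvScanAlpha, h]

lemma pvScanAlpha_drop (L : List Char) :
    L.drop (pvScanAlpha L) = L.dropWhile PySem.Chars.isalpha := by
  induction L with
  | nil => rfl
  | cons c t ih =>
    by_cases h : PySem.Chars.isalpha c
    · simp [pvScanAlpha, h, ih]
    · simp [pvScanAlpha, h]

-- the common characterisation both per-ref tests are equivalent to
def pvHit (L q : List Char) : Prop :=
  q <+: L ∧ (L.length = q.length ∨ ∃ x, L[q.length]? = some x ∧ PySem.Chars.isdigit x = true)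

lemma run_iff (L q : List Char) (ha : ∀ c ∈ q, PySem.Chars.isalpha c = true) :
    (L.takeWhile PySem.Chars.isalpha = q ∧
      (match L.dropWhile PySem.Chars.isalpha with
       | [] => true
       | x :: _ => PySem.Chars.isdigit x) = true)
    ↔ pvHit L q := by
  unfold pvHit
  constructor
  · rintro ⟨htw, hrest⟩
    refine ⟨htw ▸ List.takeWhile_prefix _, ?_⟩
    have hL : q ++ L.dropWhile PySem.Chars.isalpha = L := by
      rw [← htw]; exact List.takeWhile_append_dropWhile
    rcases hdw : L.dropWhile PySem.Chars.isalpha with _ | ⟨x, t⟩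
    · left; rw [← hL, hdw]; simp
    · right
      refine ⟨x, ?_, by rw [hdw] at hrest; simpa using hrest⟩
      rw [← hL, hdw, List.getElem?_append_right (le_refl _)]
      simp
  · rintro ⟨⟨r, rfl⟩, hb⟩
    rcases hb with hlen | ⟨x, hx, hdig⟩
    · have hr : r = [] := by
        simp at hlen
        exact hlen
      subst hr
      have htw : (q ++ ([] : List Char)).takeWhile PySem.Chars.isalpha = q := by
        simp [List.takeWhile_eq_self_iff.mpr ha]
      have hdw : (q ++ ([] : List Char)).dropWhile PySem.Chars.isalpha = [] := by
        simp [List.dropWhile_eq_nil_iff]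
        intro x hx; exact ha x hx
      rw [htw, hdw]
      exact ⟨rfl, rfl⟩
    · rw [List.getElem?_append_right (le_refl _)] at hx
      simp only [Nat.sub_self] at hx
      rcases hr : r with _ | ⟨y, t⟩
      · rw [hr] at hx; simp at hx
      · rw [hr] at hx
        simp only [List.getElem?_cons_zero, Option.some.injEq] at hx
        subst hx
        subst hr
        have hxa : PySem.Chars.isalpha y = false := digit_not_alpha y hdig
        have htwq : q.takeWhile PySem.Chars.isalpha = q := List.takeWhile_eq_self_iff.mpr ha
        have htw : (q ++ y :: t).takeWhile PySem.Chars.isalpha = q := by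
          rw [List.takeWhile_append, if_pos (by rw [htwq])]
          simp [hxa]
        have hdw : (q ++ y :: t).dropWhile PySem.Chars.isalpha = y :: t := by
          have hL : (q ++ y :: t).takeWhile PySem.Chars.isalpha ++ (q ++ y :: t).dropWhile PySem.Chars.isalpha = q ++ y :: t :=
            List.takeWhile_append_dropWhile
          rw [htw] at hL
          exact List.append_cancel_left hL
        rw [htw, hdw]
        exact ⟨rfl, by simpa using hdig⟩

set_option maxRecDepth 2000 in
lemma pvPrefixes_toList :
    pvPrefixes.map String.toList =
      [['C'], ['R'], ['J'], ['T', 'P'], ['L'], ['D'], ['F'], ['Y'], ['T'], ['F', 'B'], ['S', 'W']] := by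
  decide

lemma pvPrefix_facts :
    ∀ q ∈ pvPrefixes.map String.toList, q ≠ [] ∧ ∀ c ∈ q, PySem.Chars.isalpha c = true := by
  rw [pvPrefixes_toList]
  intro q hq
  fin_cases hq <;> exact ⟨by simp, by intro c hc; fin_cases hc <;> rfl⟩

-- A's per-ref test characterised
lemma predA_iff (ref : String) :
    (pvPrefixes.any (fun p =>
        PySem.Str.startswith (PySem.Str.upper ref) p &&
          (PySem.Str.len ref == PySem.Str.len p ||
            (match PySem.Str.pyGet? ref (PySem.Str.len p) with
             | some c => PySem.Chars.isdigit c
             | none => false)))) = true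
    ↔ ∃ q ∈ pvPrefixes.map String.toList, pvHit (PySem.Chars.upper ref.toList) q := by
  rw [List.any_eq_true]
  constructor
  · rintro ⟨p, hp, hcond⟩
    refine ⟨p.toList, List.mem_map_of_mem hp, ?_⟩
    simp only [Bool.and_eq_true, Bool.or_eq_true, beq_iff_eq] at hcond
    obtain ⟨hpre, hrest⟩ := hcond
    constructor
    · have := (PySem.Chars.startswith_iff (PySem.Str.upper ref).toList p.toList).mp (by
        simpa [PySem.Str.startswith] using hpre)
      rwa [PySem.Str.toList_upper] at this
    · rcases hrest with hlen | hdig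
      · left
        rw [PySem.Str.len_eq, PySem.Str.len_eq, Nat.cast_inj] at hlen
        simpa [PySem.Chars.upper] using hlen
      · right
        rw [PySem.Str.len_eq, PySem.Str.pyGet?_natCast] at hdig
        rcases hg : ref.toList[p.toList.length]? with _ | ⟨x⟩
        · rw [hg] at hdig; simp at hdig
        · rw [hg] at hdig
          refine ⟨PySem.Chars.upperChar x, ?_, ?_⟩
          · simp only [PySem.Chars.upper, List.getElem?_map, hg, Option.map_some]
          · rw [isdigit_upperChar]; simpa using hdig
  · rintro ⟨q, hq, hpre, hrest⟩
    obtain ⟨p, hp, rfl⟩ := List.mem_map.mp hq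
    refine ⟨p, hp, ?_⟩
    simp only [Bool.and_eq_true, Bool.or_eq_true, beq_iff_eq]
    constructor
    · simp only [PySem.Str.startswith]
      rw [PySem.Str.toList_upper]
      exact (PySem.Chars.startswith_iff _ _).mpr hpre
    · rcases hrest with hlen | ⟨x, hx, hdig⟩
      · left
        simp only [PySem.Chars.upper, List.length_map] at hlen
        rw [PySem.Str.len_eq, PySem.Str.len_eq, Nat.cast_inj]
        exact hlen
      · right
        rw [PySem.Str.len_eq, PySem.Str.pyGet?_natCast]
        simp only [PySem.Chars.upper, List.getElem?_map] at hx
        rcases hg : ref.toList[p.toList.length]? with _ | ⟨y⟩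
        · rw [hg] at hx; simp at hx
        · rw [hg] at hx
          simp only [Option.map_some, Option.some.injEq] at hx
          subst hx
          rw [isdigit_upperChar] at hdig
          simpa using hdig

-- B's per-ref test characterised
lemma predB_iff (ref : String) :
    (PySem.Set.contains pvNonIcSet ((PySem.Chars.upper ref.toList).take (pvScanAlpha (PySem.Chars.upper ref.toList))) &&
      (match (PySem.Chars.upper ref.toList).drop (pvScanAlpha (PySem.Chars.upper ref.toList)) with
       | [] => true
       | c :: _ => PySem.Chars.isdigit c)) = true
    ↔ ∃ q ∈ pvPrefixes.map String.toList, pvHit (PySem.Chars.upper ref.toList) q := by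
  rw [pvScanAlpha_take, pvScanAlpha_drop]
  rw [Bool.and_eq_true]
  rw [PySem.Set.contains_iff, pvNonIcSet, PySem.Set.mem_ofList]
  constructor
  · rintro ⟨hmem, hrest⟩
    refine ⟨_, hmem, ?_⟩
    obtain ⟨_, ha⟩ := pvPrefix_facts _ hmem
    exact (run_iff _ _ ha).mp ⟨rfl, hrest⟩
  · rintro ⟨q, hq, hhit⟩
    obtain ⟨_, ha⟩ := pvPrefix_facts _ hq
    obtain ⟨htw, hrest⟩ := (run_iff _ _ ha).mpr hhit
    exact ⟨htw ▸ hq, hrest⟩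

lemma pred_eq (ref : String) :
    (pvPrefixes.any (fun p =>
        PySem.Str.startswith (PySem.Str.upper ref) p &&
          (PySem.Str.len ref == PySem.Str.len p ||
            (match PySem.Str.pyGet? ref (PySem.Str.len p) with
             | some c => PySem.Chars.isdigit c
             | none => false))))
    = (PySem.Set.contains pvNonIcSet ((PySem.Chars.upper ref.toList).take (pvScanAlpha (PySem.Chars.upper ref.toList))) &&
        (match (PySem.Chars.upper ref.toList).drop (pvScanAlpha (PySem.Chars.upper ref.toList)) with
         | [] => true
         | c :: _ => PySem.Chars.isdigit c)) := by
  rw [Bool.eq_iff_iff, predA_iff, predB_iff]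

-- ===== VERDICT (by name: the statement is the Claim_ definition above) =====
theorem detect_ic_refs_py_spec : Claim_equal_detect_ic_refs_py := by
  intro partmap _
  unfold Spec_detect_ic_refs_py detect_ic_refs_py detect_ic_refs_py_alt
  congr 1
  funext ic_refs ref
  rw [pred_eq ref]
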